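-- pv_equiv track=rewrite | github.com/posl/comment_recommendation | script/split_gen/4_time/ja/161_D/5.py | is_rururun
-- ===== SOURCE A (Python) =====
-- def is_rururun(n):
--     if n < 10:
--         return True
--     n_str = str(n)
--     for i in range(1, len(n_str)):
--         if abs(int(n_str[i]) - int(n_str[i-1])) > 1:
--             return False
--     return True
-- ===== SOURCE B (Python) =====
-- def is_rururun(n):
--     if n < 10:
--         return True
--     while n >= 10:
--         d0 = n % 10
--         d1 = (n // 10) % 10
--         if abs(d0 - d1) > 1:
--             return False
--         n //= 10
--     return True
-- ===== Notes on version B (the rewrite author's own statement) =====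
-- stated objective: alternative
-- what changed: B extracts and compares adjacent digits arithmetically with a while-loop over n (n%10 vs (n//10)%10, then n //= 10) instead of building the decimal string and indexing it with a for-over-range loop.
import Mathlib
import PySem

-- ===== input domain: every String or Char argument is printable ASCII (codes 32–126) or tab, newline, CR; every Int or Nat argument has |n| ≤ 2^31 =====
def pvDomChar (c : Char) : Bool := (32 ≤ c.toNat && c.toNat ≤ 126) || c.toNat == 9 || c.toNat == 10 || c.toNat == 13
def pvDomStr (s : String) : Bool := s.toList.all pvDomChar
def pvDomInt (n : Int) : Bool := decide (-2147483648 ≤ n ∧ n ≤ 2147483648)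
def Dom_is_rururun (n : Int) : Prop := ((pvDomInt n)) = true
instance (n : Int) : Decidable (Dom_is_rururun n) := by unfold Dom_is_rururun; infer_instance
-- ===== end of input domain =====

-- B replaces A's decimal-string construction and index loop by a while-loop comparing
-- n % 10 with (n // 10) % 10 and dividing n by 10 (alternative decomposition; return value only).

-- ===== PORT A =====
-- int(n_str[i]); the .getD 0 default is unreachable: every character of str(n) for n ≥ 10 is a digit
def pvDigAt (cs : List Char) (i : Int) : Int :=
  (PySem.Int.ofChars? [PySem.List.pyGetD cs i ' ']).getD 0

-- the 'for i in range(1, len(n_str))' loop with early return False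
def pvLoopA (cs : List Char) : List Int → Bool
  | [] => true
  | i :: rest =>
    if 1 < (pvDigAt cs i - pvDigAt cs (i - 1)).natAbs then false
    else pvLoopA cs rest

def is_rururun (n : Int) : Bool :=
  if n < 10 then true
  else
    let nstr := PySem.Int.toChars n
    pvLoopA nstr (PySem.List.pyRange 1 (PySem.List.len nstr) 1)

-- ===== PORT B =====
-- the 'while n >= 10' loop of Source B
def pvLoopB (n : Int) : Bool :=
  if _h : 10 ≤ n then
    let d0 := PySem.Int.mod n 10
    let d1 := PySem.Int.mod (PySem.Int.floordiv n 10) 10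
    if 1 < (d0 - d1).natAbs then false
    else pvLoopB (PySem.Int.floordiv n 10)
  else true
termination_by n.toNat
decreasing_by
  simp only [PySem.Int.floordiv_eq_ediv_of_pos (by norm_num : (0:Int) < 10)]
  omega

def is_rururun_alt (n : Int) : Bool :=
  if n < 10 then true else pvLoopB n

-- ===== PRECONDITION & SPEC =====
def Spec_is_rururun (n : Int) (out : Bool) : Prop := out = is_rururun_alt n
instance (n : Int) (out : Bool) : Decidable (Spec_is_rururun n out) := by unfold Spec_is_rururun; infer_instance

-- ===== CLAIM (what is proved, stated in full; the proofs are below) =====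
def Claim_equal_is_rururun : Prop := ∀ (n : Int), Dom_is_rururun n → Spec_is_rururun n (is_rururun n)

-- ===== LEMMAS AND PROOFS =====

theorem pv_natAbs_comm (a b : Int) : (a - b).natAbs = (b - a).natAbs := by omega

-- adjacent-pair check on a list of digit values (the common abstraction of both loops)
def pvAdj : List Int → Bool
  | a :: b :: t => if 1 < (a - b).natAbs then false else pvAdj (b :: t)
  | _ => true

theorem pvAdj_iff (l : List Int) :
    pvAdj l = true ↔ l.IsChain (fun a b => (a - b).natAbs ≤ 1) := by
  induction l with
  | nil => simp [pvAdj]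
  | cons a t ih =>
    cases t with
    | nil => simp [pvAdj]
    | cons b t2 =>
      rw [List.isChain_cons_cons, ← ih]
      simp only [pvAdj]
      split_ifs with h
      · simp; omega
      · simp; omega

theorem pvAdj_reverse (l : List Int) : pvAdj l.reverse = pvAdj l := by
  rw [Bool.eq_iff_iff, pvAdj_iff, pvAdj_iff, List.isChain_reverse]
  constructor
  · intro h; exact h.imp (fun hh => by omega)
  · intro h; exact h.imp (fun hh => by omega)

theorem pv_tdc_append (f : Nat) : ∀ (n : Nat) (acc : List Char),
    Nat.toDigitsCore 10 f n acc = Nat.toDigitsCore 10 f n [] ++ acc := by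
  induction f with
  | zero => intro n acc; simp [Nat.toDigitsCore]
  | succ f ih =>
    intro n acc
    simp only [Nat.toDigitsCore]
    by_cases h : n / 10 = 0
    · simp [h]
    · simp only [h, if_false]
      rw [ih (n / 10) (Nat.digitChar (n % 10) :: acc),
          ih (n / 10) [Nat.digitChar (n % 10)]]
      simp

theorem pv_tdc_fuel (n : Nat) : ∀ f₁ f₂ : Nat, n < f₁ → n < f₂ →
    Nat.toDigitsCore 10 f₁ n [] = Nat.toDigitsCore 10 f₂ n [] := by
  induction n using Nat.strong_induction_on with
  | _ n ih =>
    intro f₁ f₂ h1 h2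
    cases f₁ with
    | zero => omega
    | succ f₁ =>
      cases f₂ with
      | zero => omega
      | succ f₂ =>
        simp only [Nat.toDigitsCore]
        by_cases h : n / 10 = 0
        · simp [h]
        · simp only [h, if_false]
          have hlt : n / 10 < n := Nat.div_lt_self (by omega) (by norm_num)
          rw [pv_tdc_append f₁ (n / 10), pv_tdc_append f₂ (n / 10),
              ih (n / 10) hlt f₁ f₂ (by omega) (by omega)]

theorem pv_toDigits_eq (m : Nat) (hm : 0 < m) :
    Nat.toDigits 10 m = ((Nat.digits 10 m).map Nat.digitChar).reverse := by
  induction m using Nat.strong_induction_on with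
  | _ m ih =>
    by_cases h : m < 10
    · have h0 : m / 10 = 0 := Nat.div_eq_of_lt h
      rw [Nat.digits_def' (by norm_num : 1 < 10) hm]
      have h1 : m % 10 = m := Nat.mod_eq_of_lt h
      simp [Nat.toDigits, Nat.toDigitsCore, h0, h1]
    · replace h : 10 ≤ m := by omega
      have hdiv : 0 < m / 10 := Nat.div_pos h (by norm_num)
      have hlt : m / 10 < m := Nat.div_lt_self (by omega) (by norm_num)
      have hstep : Nat.toDigits 10 m =
          Nat.toDigits 10 (m / 10) ++ [Nat.digitChar (m % 10)] := by
        show Nat.toDigitsCore 10 (m + 1) m [] = _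
        simp only [Nat.toDigitsCore]
        have hne : ¬ m / 10 = 0 := by omega
        simp only [hne, if_false]
        rw [pv_tdc_append m (m / 10),
            pv_tdc_fuel (m / 10) m (m / 10 + 1) (by omega) (by omega)]
        rfl
      rw [hstep, Nat.digits_def' (by norm_num : 1 < 10) hm,
          ih (m / 10) hlt hdiv]
      simp

theorem pv_decode (d : Nat) (hd : d < 10) :
    (PySem.Int.ofChars? [Nat.digitChar d]).getD 0 = (d : Int) := by
  interval_cases d <;> decide

theorem pv_loopA_eq (cs : List Char) : ∀ (j k : Nat), cs.length - k ≤ j → 1 ≤ k →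
    k ≤ cs.length →
    pvLoopA cs (PySem.List.pyRange (k : Int) (PySem.List.len cs) 1) =
      pvAdj ((cs.drop (k - 1)).map (fun c => (PySem.Int.ofChars? [c]).getD 0)) := by
  intro j
  induction j with
  | zero =>
    intro k hj h1 h2
    have hk : k = cs.length := by omega
    have hnil : PySem.List.pyRange (k : Int) (PySem.List.len cs) 1 = [] := by
      apply PySem.List.pyRange_one_eq_nil
      simp [PySem.List.len_eq, hk]
    rw [hnil]
    have hone : (cs.drop (k - 1)).length = 1 := by
      rw [List.length_drop]; omega
    obtain ⟨a, ha⟩ := List.length_eq_one_iff.mp hone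
    rw [ha]
    rfl
  | succ j ihj =>
    intro k hj h1 h2
    by_cases hkl : k = cs.length
    · have hnil : PySem.List.pyRange (k : Int) (PySem.List.len cs) 1 = [] := by
        apply PySem.List.pyRange_one_eq_nil
        simp [PySem.List.len_eq, hkl]
      rw [hnil]
      have hone : (cs.drop (k - 1)).length = 1 := by
        rw [List.length_drop]; omega
      obtain ⟨a, ha⟩ := List.length_eq_one_iff.mp hone
      rw [ha]
      rfl
    · have hk : k < cs.length := by omega
      rw [PySem.List.pyRange_one_cons (by simp [PySem.List.len_eq]; omega)]
      simp only [pvLoopA]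
      have e1 : pvDigAt cs (k : Int) = (PySem.Int.ofChars? [cs[k]]).getD 0 := by
        unfold pvDigAt
        rw [PySem.List.pyGetD_natCast, List.getD_eq_getElem cs ' ' hk]
      have ecast : ((k : Int) - 1) = ((k - 1 : Nat) : Int) := by omega
      have hk1 : k - 1 < cs.length := by omega
      have e2 : pvDigAt cs ((k : Int) - 1) = (PySem.Int.ofChars? [cs[k - 1]]).getD 0 := by
        unfold pvDigAt
        rw [ecast, PySem.List.pyGetD_natCast, List.getD_eq_getElem cs ' ' hk1]
      rw [e1, e2]
      have hdrop1 : cs.drop (k - 1) = cs[k - 1] :: cs.drop k := by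
        have hd := List.drop_eq_getElem_cons hk1
        rw [show k - 1 + 1 = k from by omega] at hd
        exact hd
      have hdrop2 : cs.drop k = cs[k] :: cs.drop (k + 1) := List.drop_eq_getElem_cons hk
      rw [hdrop1, hdrop2]
      simp only [List.map_cons, pvAdj]
      rw [pv_natAbs_comm]
      split_ifs with hcond
      · rfl
      · have : ((k : Int) + 1) = ((k + 1 : Nat) : Int) := by omega
        rw [this, ihj (k + 1) (by omega) (by omega) (by omega),
            show k + 1 - 1 = k from rfl, hdrop2, List.map_cons]

theorem pv_loopB_eq : ∀ (m : Nat) (n : Int), n.toNat = m → 10 ≤ n →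
    pvLoopB n = pvAdj ((Nat.digits 10 n.toNat).map (fun d : Nat => (d : Int))) := by
  intro m
  induction m using Nat.strong_induction_on with
  | _ m ih =>
    intro n hm h
    rw [pvLoopB]
    simp only [h, dite_true]
    have hmod : PySem.Int.mod n 10 = n % 10 :=
      PySem.Int.mod_eq_emod_of_pos (by norm_num)
    have hdivd : PySem.Int.floordiv n 10 = n / 10 :=
      PySem.Int.floordiv_eq_ediv_of_pos (by norm_num)
    have hmod2 : PySem.Int.mod (PySem.Int.floordiv n 10) 10 = (n / 10) % 10 := by
      rw [hdivd]; exact PySem.Int.mod_eq_emod_of_pos (by norm_num)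
    have hm10 : 10 ≤ n.toNat := by omega
    have hddig : Nat.digits 10 n.toNat = n.toNat % 10 :: Nat.digits 10 (n.toNat / 10) :=
      Nat.digits_def' (by norm_num) (by omega)
    have hdiv1 : 0 < n.toNat / 10 := Nat.div_pos hm10 (by norm_num)
    have hddig2 : Nat.digits 10 (n.toNat / 10) =
        (n.toNat / 10) % 10 :: Nat.digits 10 (n.toNat / 10 / 10) :=
      Nat.digits_def' (by norm_num) hdiv1
    rw [hddig, hddig2]
    simp only [List.map_cons, pvAdj]
    have ec0 : n % 10 = ((n.toNat % 10 : Nat) : Int) := by omega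
    have ec1 : (n / 10) % 10 = ((n.toNat / 10 % 10 : Nat) : Int) := by omega
    rw [hmod, hmod2, hdivd, ec0, ec1]
    split_ifs with hcond
    · rfl
    · by_cases hrec : 10 ≤ n / 10
      · have htn : (n / 10).toNat = n.toNat / 10 := by omega
        have hlt : n.toNat / 10 < m := by omega
        rw [ih (n.toNat / 10) hlt (n / 10) htn hrec, htn, hddig2]
        simp
      · rw [pvLoopB]
        simp only [hrec, dite_false]
        have h1 : n.toNat / 10 < 10 := by omega
        have h2 : n.toNat / 10 / 10 = 0 := Nat.div_eq_of_lt h1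
        have h3 : n.toNat / 10 % 10 = n.toNat / 10 := Nat.mod_eq_of_lt h1
        rw [h2]
        rfl

-- ===== VERDICT (by name: the statement is the Claim_ definition above) =====
theorem is_rururun_spec : Claim_equal_is_rururun := by
  intro n _hdom
  unfold Spec_is_rururun is_rururun is_rururun_alt
  by_cases h : n < 10
  · simp [h]
  · simp only [h, if_false]
    replace h : 10 ≤ n := by omega
    have hneg : ¬ n < 0 := by omega
    have hcs : PySem.Int.toChars n = Nat.toDigits 10 n.toNat := by
      simp [PySem.Int.toChars, hneg]
    have hm : 0 < n.toNat := by omega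
    have hlen : 1 ≤ (PySem.Int.toChars n).length := by
      rw [hcs, pv_toDigits_eq n.toNat hm]
      have : Nat.digits 10 n.toNat ≠ [] :=
        Nat.digits_ne_nil_iff_ne_zero.mpr (by omega)
      simp only [List.length_reverse, List.length_map]
      exact Nat.one_le_iff_ne_zero.mpr (by simpa using this)
    have hA := pv_loopA_eq (PySem.Int.toChars n) (PySem.Int.toChars n).length 1
        (by omega) (le_refl 1) hlen
    rw [Nat.cast_one] at hA
    rw [hA]
    simp only [Nat.sub_self, List.drop_zero]
    rw [hcs, pv_toDigits_eq n.toNat hm, List.map_reverse, List.map_map]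
    have hmapeq : (Nat.digits 10 n.toNat).map
        ((fun c => (PySem.Int.ofChars? [c]).getD 0) ∘ Nat.digitChar) =
        (Nat.digits 10 n.toNat).map (fun d : Nat => (d : Int)) := by
      apply List.map_congr_left
      intro d hd
      exact pv_decode d (Nat.digits_lt_base (by norm_num) hd)
    rw [hmapeq, pvAdj_reverse, pv_loopB_eq n.toNat n rfl h]
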